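-- pv_equiv track=rewrite | github.com/taozhewang/first_study | test/cut-off-project.py | patterns_simplify
-- ===== SOURCE A (Python) =====
-- def patterns_simplify(patterns_left, patterns_right):
--     patterns_left_plus, patterns_right_plus = [], []
--     k = len(patterns_left)
--     for i in range(k):
--         patl = patterns_left[i]
--         if patl not in patterns_left_plus:
--             patterns_left_plus.append(patl)
--             patterns_right_plus.append(patterns_right[i])
--         else:
--             origin_index = patterns_left_plus.index(patl)
--             cut = patterns_right_plus[origin_index][2]
--             if patterns_right[i][2] < cut:
--                 patterns_left_plus.pop(origin_index)
--                 patterns_right_plus.pop(origin_index)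
--                 patterns_left_plus.append(patl)
--                 patterns_right_plus.append(patterns_right[i])
--     patterns = list(zip(patterns_left_plus, patterns_right_plus))
--     return patterns
-- ===== SOURCE B (Python) =====
-- def patterns_simplify(patterns_left, patterns_right):
--     # Single pass: for each key keep (index of first attainment of the minimal
--     # cut, left pattern, right row); then order entries by that index.  The
--     # entry A keeps for a key is the row at the first index attaining the
--     # minimal right[2], and A's final order is by that index (each strict
--     # improvement moved the entry to the end, so the last move -- at the first
--     # min-attaining index -- fixes its place).  No in-loop list scans or pop/append.
--     best = {}
--     for i, patl in enumerate(patterns_left):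
--         patr = patterns_right[i]
--         key = tuple(patl)
--         cur = best.get(key)
--         if cur is None or patr[2] < cur[2][2]:
--             best[key] = (i, patl, patr)
--     return [(l, r) for _, l, r in sorted(best.values(), key=lambda t: t[0])]
-- ===== Notes on version B (the rewrite author's own statement) =====
-- stated objective: alternative
-- what changed: Replaces A's in-loop list scans with pop/append move-to-end by one dict pass recording, per key, the first index attaining the minimal right[2] together with its row, and a final sort of the dict values by that index, which reconstructs A's order.
import Mathlib
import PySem

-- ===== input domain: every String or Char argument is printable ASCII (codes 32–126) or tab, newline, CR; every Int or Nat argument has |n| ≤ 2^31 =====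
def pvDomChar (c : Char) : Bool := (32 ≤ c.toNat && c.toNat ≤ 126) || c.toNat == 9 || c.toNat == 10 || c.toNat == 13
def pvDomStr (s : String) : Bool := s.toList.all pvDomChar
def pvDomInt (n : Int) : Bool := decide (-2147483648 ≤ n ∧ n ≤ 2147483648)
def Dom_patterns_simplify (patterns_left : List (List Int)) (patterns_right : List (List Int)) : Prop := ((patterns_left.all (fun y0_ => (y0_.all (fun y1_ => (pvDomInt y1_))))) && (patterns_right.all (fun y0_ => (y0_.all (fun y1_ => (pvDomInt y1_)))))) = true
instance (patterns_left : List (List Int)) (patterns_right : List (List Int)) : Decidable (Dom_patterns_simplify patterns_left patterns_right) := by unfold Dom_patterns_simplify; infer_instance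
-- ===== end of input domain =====

-- B replaces A's in-loop list scans with pop/append move-to-end by one dict pass tracking,
-- per key, the first index attaining the minimal right[2] and its row, then a sort of the
-- dict values by that index, which reconstructs A's order (objective: alternative algorithm).


-- ===== PORT A =====
-- one loop step of A: st = (patterns_left_plus, patterns_right_plus), p = (patterns_left[i], patterns_right[i])
def pvAstep (st : List (List Int) × List (List Int)) (p : List Int × List Int) :
    List (List Int) × List (List Int) :=
  if p.1 ∉ st.1 then
    (st.1 ++ [p.1], st.2 ++ [p.2])
  else
    match PySem.List.index? st.1 p.1 with
    | none => st  -- unreachable: p.1 ∈ st.1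
    | some origin_index =>
      -- [2] access via getD: exact under Pre_ (rows reached here have length ≥ 3)
      let cut := (st.2.getD origin_index []).getD 2 0
      if p.2.getD 2 0 < cut then
        (st.1.eraseIdx origin_index ++ [p.1], st.2.eraseIdx origin_index ++ [p.2])
      else st

def patterns_simplify (patterns_left : List (List Int)) (patterns_right : List (List Int)) : List (List Int × List Int) :=
  let k := patterns_left.length
  -- patterns_right.getD i [] is exact under Pre_ (patterns_right has length ≥ k)
  let st := (List.range k).foldl
    (fun st i => pvAstep st (patterns_left.getD i [], patterns_right.getD i [])) ([], [])
  st.1.zip st.2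

-- ===== PORT B =====
def patterns_simplify_alt (patterns_left : List (List Int)) (patterns_right : List (List Int)) : List (List Int × List Int) :=
  let best := (PySem.List.enumerate patterns_left 0).foldl
    (fun d p =>
      -- patr = patterns_right[i]; exact under Pre_ (patterns_right has length ≥ k)
      let patr := PySem.List.pyGetD patterns_right p.1 []
      match d.get? p.2 with
      | none => d.insert p.2 (p.1, p.2, patr)
      | some cur =>
        -- [2] accesses via getD: exact under Pre_ (rows reached here have length ≥ 3)
        if patr.getD 2 0 < cur.2.2.getD 2 0 then d.insert p.2 (p.1, p.2, patr) else d)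
    (PySem.Dict.empty : PySem.Dict (List Int) (Int × List Int × List Int))
  (PySem.List.sorted best.values (fun t => t.1) false).map (fun t => (t.2.1, t.2.2))

-- ===== PRECONDITION & SPEC =====
-- Pre_ excludes exactly the inputs on which A raises IndexError: patterns_right shorter than
-- patterns_left, or a row (at index < k) of a duplicated left pattern having fewer than 3 entries.
def Pre_patterns_simplify (patterns_left : List (List Int)) (patterns_right : List (List Int)) : Prop :=
  patterns_left.length ≤ patterns_right.length ∧
  ∀ i < patterns_left.length,
    2 ≤ patterns_left.count (patterns_left.getD i []) → 3 ≤ (patterns_right.getD i []).length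
instance (patterns_left : List (List Int)) (patterns_right : List (List Int)) : Decidable (Pre_patterns_simplify patterns_left patterns_right) := by unfold Pre_patterns_simplify; infer_instance

def pvWitness_patterns_simplify : List (List Int) × List (List Int) :=
  ([[1, 2], [3], [1, 2]], [[9, 9, 5], [1, 2, 3], [9, 9, 4]])

def Spec_patterns_simplify (patterns_left : List (List Int)) (patterns_right : List (List Int)) (out : List (List Int × List Int)) : Prop := out = patterns_simplify_alt patterns_left patterns_right
instance (patterns_left : List (List Int)) (patterns_right : List (List Int)) (out : List (List Int × List Int)) : Decidable (Spec_patterns_simplify patterns_left patterns_right out) := by unfold Spec_patterns_simplify; infer_instance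

-- ===== CLAIM (what is proved, stated in full; the proofs are below) =====
def Claim_equal_patterns_simplify : Prop := ∀ (patterns_left : List (List Int)) (patterns_right : List (List Int)), Dom_patterns_simplify patterns_left patterns_right → Pre_patterns_simplify patterns_left patterns_right → Spec_patterns_simplify patterns_left patterns_right (patterns_simplify patterns_left patterns_right)

-- ===== LEMMAS AND PROOFS =====

-- B's dict step on an already-fetched (index, left, right) triple
def pvBstepZ (d : PySem.Dict (List Int) (Int × List Int × List Int))
    (e : Int × List Int × List Int) : PySem.Dict (List Int) (Int × List Int × List Int) :=
  match d.get? e.2.1 with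
  | none => d.insert e.2.1 e
  | some cur => if e.2.2.getD 2 0 < cur.2.2.getD 2 0 then d.insert e.2.1 e else d

-- the "augmented A" step: A's list step carrying the placement index along
def pvAugStep (aug : List (Int × List Int × List Int)) (e : Int × List Int × List Int) :
    List (Int × List Int × List Int) :=
  match PySem.List.index? (aug.map (fun t => t.2.1)) e.2.1 with
  | none => aug ++ [e]
  | some oi =>
    if e.2.2.getD 2 0 < (aug.getD oi (0, [], [])).2.2.getD 2 0 then
      aug.eraseIdx oi ++ [e]
    else aug

def pvMk (t : Int × List Int × List Int) : List Int × (Int × List Int × List Int) := (t.2.1, t)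

lemma pvEraseIdx_mid {α : Type} (pre suf : List α) (a : α) :
    (pre ++ a :: suf).eraseIdx pre.length = pre ++ suf := by
  rw [List.eraseIdx_append_of_length_le (le_refl _), Nat.sub_self, List.eraseIdx_cons_zero]

lemma pvSetPerm {α : Type} (xs : List α) (oi : Nat) (w : α) (h : oi < xs.length) :
    (xs.set oi w).Perm (xs.eraseIdx oi ++ [w]) := by
  rw [List.set_eq_take_append_cons_drop, if_pos h, List.eraseIdx_eq_take_drop_succ]
  exact List.perm_middle.trans (List.perm_append_singleton _ _).symm

lemma pvEnumZip (pl pr : List (List Int)) (h : pl.length ≤ pr.length) :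
    PySem.List.enumerate (pl.zip pr) 0 =
      (PySem.List.enumerate pl 0).map (fun p => (p.1, p.2, PySem.List.pyGetD pr p.1 [])) := by
  apply List.ext_getElem
  · simp [PySem.List.length_enumerate]; omega
  · intro k h1 h2
    have hk : k < pl.length := by
      simpa [PySem.List.length_enumerate] using h2
    have hkr : k < pr.length := lt_of_lt_of_le hk h
    have hkz : k < (pl.zip pr).length := by simp; omega
    simp [PySem.List.getElem_enumerate, List.getElem_zip,
      List.getElem?_eq_getElem hkr]

lemma pvStep_proj (aug : List (Int × List Int × List Int)) (e : Int × List Int × List Int) :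
    pvAstep (aug.map (fun t => t.2.1), aug.map (fun t => t.2.2)) (e.2.1, e.2.2) =
      ((pvAugStep aug e).map (fun t => t.2.1), (pvAugStep aug e).map (fun t => t.2.2)) := by
  unfold pvAstep pvAugStep
  cases hidx : PySem.List.index? (aug.map (fun t => t.2.1)) e.2.1 with
  | none =>
    have hmem : e.2.1 ∉ aug.map (fun t => t.2.1) := (PySem.List.index?_eq_none_iff _ _).1 hidx
    simp [hmem]
  | some oi =>
    have hsome : (PySem.List.index? (aug.map (fun t => t.2.1)) e.2.1).isSome := by
      rw [hidx]; rfl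
    have hmem : e.2.1 ∈ aug.map (fun t => t.2.1) :=
      (PySem.List.index?_isSome_iff _ _).1 hsome
    obtain ⟨hk, hget, -⟩ := PySem.List.getElem_of_index?_eq_some hidx
    have hlen : oi < aug.length := by simpa using hk
    have hcut : (aug.map (fun t => t.2.2)).getD oi [] = (aug.getD oi (0, [], [])).2.2 := by
      rw [List.getD_eq_getElem _ _ (by simpa using hlen), List.getD_eq_getElem _ _ hlen]
      simp
    simp only [hmem, not_true_eq_false, if_false]
    rw [hcut]
    split
    · simp [List.eraseIdx_map]
    · rfl

lemma pvStep_nodup (aug : List (Int × List Int × List Int)) (e : Int × List Int × List Int)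
    (hnd : (aug.map (fun t => t.2.1)).Nodup) :
    ((pvAugStep aug e).map (fun t => t.2.1)).Nodup := by
  unfold pvAugStep
  cases hidx : PySem.List.index? (aug.map (fun t => t.2.1)) e.2.1 with
  | none =>
    have hmem : e.2.1 ∉ aug.map (fun t => t.2.1) := (PySem.List.index?_eq_none_iff _ _).1 hidx
    simp only [List.map_append, List.map_cons, List.map_nil]
    exact hnd.append (List.nodup_singleton _) (by
      intro q hq hq2
      simp only [List.mem_singleton] at hq2
      exact hmem (hq2 ▸ hq))
  | some oi =>
    obtain ⟨pre, suf, hdec, hplen, hpre⟩ := (PySem.List.index?_eq_some_iff _ _ _).1 hidx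
    dsimp only
    by_cases hc : e.2.2.getD 2 0 < (aug.getD oi (0, [], [])).2.2.getD 2 0
    · rw [if_pos hc, List.map_append, ← List.eraseIdx_map, hdec, ← hplen, pvEraseIdx_mid]
      rw [hdec] at hnd
      have h2 : (e.2.1 :: (pre ++ suf)).Nodup := List.nodup_middle.1 hnd
      simp only [List.map_cons, List.map_nil]
      exact (List.nodup_cons.1 h2).2.append (List.nodup_singleton _) (by
        intro q hq hq2
        simp only [List.mem_singleton] at hq2
        exact (List.nodup_cons.1 h2).1 (hq2 ▸ hq))
    · rw [if_neg hc]; exact hnd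

lemma pvStep_order (aug : List (Int × List Int × List Int)) (e : Int × List Int × List Int)
    (hpw : aug.Pairwise (fun a b => a.1 < b.1)) (hbd : ∀ t ∈ aug, t.1 < e.1) :
    (pvAugStep aug e).Pairwise (fun a b => a.1 < b.1) ∧
      ∀ t ∈ pvAugStep aug e, t.1 < e.1 + 1 := by
  have hself : e.1 < e.1 + 1 := by omega
  unfold pvAugStep
  cases hidx : PySem.List.index? (aug.map (fun t => t.2.1)) e.2.1 with
  | none =>
    constructor
    · exact List.pairwise_append.2 ⟨hpw, List.pairwise_singleton _ _, by
        intro a ha b hb; simp only [List.mem_singleton] at hb; exact hb ▸ hbd a ha⟩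
    · intro t ht
      rcases List.mem_append.1 ht with h | h
      · exact lt_trans (hbd t h) hself
      · simp only [List.mem_singleton] at h; subst h; exact hself
  | some oi =>
    have hsub : ∀ t ∈ aug.eraseIdx oi, t ∈ aug := fun t ht =>
      (List.eraseIdx_sublist aug oi).mem ht
    have hpw' : (aug.eraseIdx oi).Pairwise (fun a b => a.1 < b.1) :=
      hpw.sublist (List.eraseIdx_sublist aug oi)
    dsimp only
    by_cases hc : e.2.2.getD 2 0 < (aug.getD oi (0, [], [])).2.2.getD 2 0
    · rw [if_pos hc]
      constructor
      · exact List.pairwise_append.2 ⟨hpw', List.pairwise_singleton _ _, by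
          intro a ha b hb; simp only [List.mem_singleton] at hb
          exact hb ▸ hbd a (hsub a ha)⟩
      · intro t ht
        rcases List.mem_append.1 ht with h | h
        · exact lt_trans (hbd t (hsub t h)) hself
        · simp only [List.mem_singleton] at h; subst h; exact hself
    · rw [if_neg hc]
      exact ⟨hpw, fun t ht => lt_trans (hbd t ht) hself⟩

lemma pvStep_items (aug : List (Int × List Int × List Int))
    (d : PySem.Dict (List Int) (Int × List Int × List Int)) (e : Int × List Int × List Int)
    (hperm : d.items.Perm (aug.map pvMk))
    (hnd : (aug.map (fun t => t.2.1)).Nodup) :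
    (pvBstepZ d e).items.Perm ((pvAugStep aug e).map pvMk) := by
  have hkeys : (d.items.map (fun p => p.1)).Perm (aug.map (fun t => t.2.1)) := by
    have := hperm.map (fun p => p.1)
    simpa [pvMk, Function.comp] using this
  unfold pvBstepZ pvAugStep
  cases hidx : PySem.List.index? (aug.map (fun t => t.2.1)) e.2.1 with
  | none =>
    have hmem : e.2.1 ∉ aug.map (fun t => t.2.1) := (PySem.List.index?_eq_none_iff _ _).1 hidx
    have hcont : d.contains e.2.1 = false := by
      simp only [PySem.Dict.contains, List.any_eq_false]
      intro p hp
      simp only [Bool.not_eq_true, beq_eq_false_iff_ne, ne_eq]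
      intro hEq
      exact hmem (hEq ▸ hkeys.mem_iff.1 (List.mem_map_of_mem hp))
    have hget : d.get? e.2.1 = none := (PySem.Dict.get?_eq_none_iff_contains d _).2 hcont
    rw [hget]
    dsimp only
    rw [PySem.Dict.items_insert_of_not_contains d e hcont, List.map_append]
    exact hperm.append_right _
  | some oi =>
    obtain ⟨hk', hget', -⟩ := PySem.List.getElem_of_index?_eq_some hidx
    have hk : oi < aug.length := by simpa using hk'
    have ha : aug[oi].2.1 = e.2.1 := by simpa using hget'
    have hkndp : d.keys.Nodup := by
      have : d.keys = d.items.map (fun p => p.1) := rfl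
      rw [this]
      exact hkeys.nodup_iff.2 hnd
    have hmemit : (e.2.1, aug[oi]) ∈ d.items := by
      apply hperm.mem_iff.2
      apply List.mem_map.2
      exact ⟨aug[oi], List.getElem_mem hk, by simp [pvMk, ha]⟩
    have hget : d.get? e.2.1 = some aug[oi] := PySem.Dict.get?_of_mem_items d hmemit hkndp
    rw [hget]
    dsimp only
    rw [List.getD_eq_getElem _ _ hk]
    by_cases hc : e.2.2.getD 2 0 < aug[oi].2.2.getD 2 0
    · simp only [if_pos hc]
      have hcont : d.contains e.2.1 = true := by
        simp only [PySem.Dict.contains, List.any_eq_true]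
        exact ⟨(e.2.1, aug[oi]), hmemit, by simp⟩
      rw [PySem.Dict.items_insert_of_contains d e hcont]
      have haux : (aug.map pvMk).map
            (fun p => if (p.1 == e.2.1) = true then (e.2.1, e) else p)
          = (aug.set oi e).map pvMk := by
        apply List.ext_getElem
        · simp
        · intro j hj1 hj2
          have hjlen : j < aug.length := by simpa using hj1
          simp only [List.getElem_map, List.getElem_set]
          by_cases hje : j = oi
          · subst hje
            simp [pvMk, ha]
          · have hne : aug[j].2.1 ≠ e.2.1 := by
              intro hcontr
              apply hje
              have h1 : (aug.map (fun t => t.2.1))[j]'(by simpa using hjlen)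
                  = (aug.map (fun t => t.2.1))[oi]'(by simpa using hk) := by
                simp [hcontr, ha]
              exact (List.Nodup.getElem_inj_iff hnd).1 h1
            simp [pvMk, hne, Ne.symm hje]
      have h1 : (d.items.map (fun p => if (p.1 == e.2.1) = true then (e.2.1, e) else p)).Perm
          ((aug.set oi e).map pvMk) := haux ▸ hperm.map _
      exact h1.trans ((pvSetPerm aug oi e hk).map pvMk)
    · simp only [if_neg hc]
      exact hperm

-- the combined fold invariant
lemma pvFoldAll (ql : List (List Int × List Int)) : ∀ (s : Int)
    (aug : List (Int × List Int × List Int))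
    (d : PySem.Dict (List Int) (Int × List Int × List Int)),
    d.items.Perm (aug.map pvMk) →
    (aug.map (fun t => t.2.1)).Nodup →
    aug.Pairwise (fun a b => a.1 < b.1) →
    (∀ t ∈ aug, t.1 < s) →
    ((PySem.List.enumerate ql s).foldl pvBstepZ d).items.Perm
        (((PySem.List.enumerate ql s).foldl pvAugStep aug).map pvMk) ∧
      (((PySem.List.enumerate ql s).foldl pvAugStep aug).map (fun t => t.2.1)).Nodup ∧
      ((PySem.List.enumerate ql s).foldl pvAugStep aug).Pairwise (fun a b => a.1 < b.1) ∧
      ql.foldl pvAstep (aug.map (fun t => t.2.1), aug.map (fun t => t.2.2)) =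
        (((PySem.List.enumerate ql s).foldl pvAugStep aug).map (fun t => t.2.1),
         ((PySem.List.enumerate ql s).foldl pvAugStep aug).map (fun t => t.2.2)) := by
  intro s aug d
  revert s aug d
  induction ql with
  | nil =>
    intro s aug d hperm hnd hpw _
    simp only [PySem.List.enumerate_nil, List.foldl_nil]
    exact ⟨hperm, hnd, hpw, trivial⟩
  | cons q qs ih =>
    intro s aug d hperm hnd hpw hbd
    have horder := pvStep_order aug (s, q) hpw hbd
    obtain ⟨P1, P2, P3, P4⟩ := ih (s + 1) (pvAugStep aug (s, q)) (pvBstepZ d (s, q))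
      (pvStep_items aug d (s, q) hperm hnd) (pvStep_nodup aug (s, q) hnd)
      horder.1 horder.2
    rw [PySem.List.enumerate_cons]
    simp only [List.foldl_cons]
    refine ⟨P1, P2, P3, ?_⟩
    rw [show pvAstep (aug.map (fun t => t.2.1), aug.map (fun t => t.2.2)) q =
        ((pvAugStep aug (s, q)).map (fun t => t.2.1),
         (pvAugStep aug (s, q)).map (fun t => t.2.2)) from pvStep_proj aug (s, q)]
    exact P4


-- A's index loop is the fold over the zipped input
lemma pvRangeZip (pl pr : List (List Int)) (s : List (List Int) × List (List Int))
    (h : pl.length ≤ pr.length) :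
    (List.range pl.length).foldl
      (fun st i => pvAstep st (pl.getD i [], pr.getD i [])) s =
    (pl.zip pr).foldl pvAstep s := by
  induction pl generalizing pr s with
  | nil => simp
  | cons x xs ih =>
    cases pr with
    | nil => simp at h
    | cons y ys =>
      simp only [List.length_cons, List.range_succ_eq_map, List.foldl_cons, List.foldl_map,
        List.getD_cons_zero, List.getD_cons_succ, List.zip_cons_cons]
      exact ih ys _ (by simpa using h)

-- ===== VERDICT (by name: the statement is the Claim_ definition above) =====
theorem patterns_simplify_spec : Claim_equal_patterns_simplify := by
  intro pl pr _ hpre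
  unfold Spec_patterns_simplify patterns_simplify patterns_simplify_alt
  dsimp only
  rw [pvRangeZip pl pr ([], []) hpre.1]
  have hBfold : (PySem.List.enumerate pl 0).foldl
      (fun d p =>
        let patr := PySem.List.pyGetD pr p.1 []
        match d.get? p.2 with
        | none => d.insert p.2 (p.1, p.2, patr)
        | some cur =>
          if patr.getD 2 0 < cur.2.2.getD 2 0 then d.insert p.2 (p.1, p.2, patr) else d)
      (PySem.Dict.empty : PySem.Dict (List Int) (Int × List Int × List Int))
      = (PySem.List.enumerate (pl.zip pr) 0).foldl pvBstepZ PySem.Dict.empty := by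
    rw [pvEnumZip pl pr hpre.1, List.foldl_map]
    rfl
  obtain ⟨P1, P2, P3, P4⟩ := pvFoldAll (pl.zip pr) 0 [] PySem.Dict.empty
    (List.Perm.refl _) List.nodup_nil List.Pairwise.nil (by intro t ht; cases ht)
  rw [hBfold]
  set aug' := (PySem.List.enumerate (pl.zip pr) 0).foldl pvAugStep [] with haug
  have hvals : aug'.Perm
      (((PySem.List.enumerate (pl.zip pr) 0).foldl pvBstepZ PySem.Dict.empty).values) := by
    have h2 := P1.map (fun p => p.2)
    have h3 : (aug'.map pvMk).map (fun p => p.2) = aug' := by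
      rw [List.map_map]
      exact List.map_id' aug'
    exact (h3 ▸ h2).symm
  have hsorted : PySem.List.sorted
      (((PySem.List.enumerate (pl.zip pr) 0).foldl pvBstepZ PySem.Dict.empty).values)
      (fun t => t.1) false = aug' :=
    PySem.List.sorted_eq_of_perm_of_pairwise_lt _ _ _ hvals P3
  have P4' : (pl.zip pr).foldl pvAstep ([], []) =
      (aug'.map (fun t => t.2.1), aug'.map (fun t => t.2.2)) := by simpa using P4
  rw [hsorted, P4', List.zip_map']
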